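-- pv_equiv track=rewrite | github.com/easel/helix | scripts/refresh_context_digests.py | select_digest_practices
-- ===== SOURCE A (Python) =====
-- from collections import OrderedDict, defaultdict
--
-- def select_digest_practices(
--     library_practices: list[str], override_practices: list[str], limit: int
-- ) -> list[str]:
--     prioritized: list[str] = []
--     library_set = set(library_practices)
--     if library_practices:
--         prioritized.append(library_practices[0])
--
--     chosen_override = ""
--     for practice in override_practices:
--         if practice not in library_set:
--             chosen_override = practice
--             break
--     if not chosen_override and override_practices:
--         chosen_override = override_practices[0]
--     if chosen_override:
--         prioritized.append(chosen_override)
--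
--     prioritized.extend(library_practices[1:])
--     prioritized.extend(practice for practice in override_practices if practice != chosen_override)
--     return compact(prioritized, limit)
--
-- def compact(items: list[str], limit: int) -> list[str]:
--     ordered = list(OrderedDict.fromkeys(item for item in items if item))
--     return ordered[:limit]
-- ===== SOURCE B (Python) =====
-- def select_digest_practices(
--     library_practices: list[str], override_practices: list[str], limit: int
-- ) -> list[str]:
--     lib_set = set(library_practices)
--     chosen = next((p for p in override_practices if p not in lib_set), "")
--     if not chosen and override_practices:
--         chosen = override_practices[0]
--
--     # rank each distinct non-empty practice by its priority position, then sort by rank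
--     rank: dict[str, int] = {}
--
--     def note(p: str, k: int) -> None:
--         if p and (p not in rank or k < rank[p]):
--             rank[p] = k
--
--     for i, p in enumerate(library_practices):
--         note(p, 0 if i == 0 else i + 1)
--     note(chosen, 1)
--     base = len(library_practices) + 1
--     for j, p in enumerate(override_practices):
--         if p != chosen:
--             note(p, base + j)
--
--     return sorted(rank, key=rank.get)[:limit]
-- ===== Notes on version B (the rewrite author's own statement) =====
-- stated objective: alternative
-- what changed: B never builds A's prioritized candidate list nor dedupes it: it assigns each distinct non-empty practice a numeric priority rank (0 for library head, 1 for the chosen override, i+1 for remaining library entries, len(lib)+1+j for remaining overrides) kept minimal in a dict, then sorts the dict keys by rank and truncates.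
import Mathlib
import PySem

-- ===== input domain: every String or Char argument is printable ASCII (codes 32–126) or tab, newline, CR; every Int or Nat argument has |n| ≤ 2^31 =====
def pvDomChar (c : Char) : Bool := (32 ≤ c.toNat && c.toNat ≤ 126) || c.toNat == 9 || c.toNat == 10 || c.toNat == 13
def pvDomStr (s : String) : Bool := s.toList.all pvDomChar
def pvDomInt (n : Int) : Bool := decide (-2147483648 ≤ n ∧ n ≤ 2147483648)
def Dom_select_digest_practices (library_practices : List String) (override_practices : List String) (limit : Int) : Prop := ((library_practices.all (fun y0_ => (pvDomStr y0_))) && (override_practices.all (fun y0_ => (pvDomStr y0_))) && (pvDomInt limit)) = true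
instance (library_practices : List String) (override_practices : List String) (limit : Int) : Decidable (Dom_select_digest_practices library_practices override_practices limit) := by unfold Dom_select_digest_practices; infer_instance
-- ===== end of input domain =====

-- B replaces A's build-prioritized-list-then-dedupe-and-truncate pipeline by a ranking scheme:
-- each distinct non-empty practice gets a numeric priority rank kept minimal in a dict, the dict
-- keys are sorted by rank and truncated (objective: alternative algorithm, similar cost).

-- ===== PORT A =====
-- the 'for practice in override_practices: if practice not in library_set: chosen = practice; break' loop
def chooseOverrideA (library_set : PySem.Set String) : List String → String
  | [] => ""
  | p :: rest => if ¬ PySem.Set.contains library_set p then p else chooseOverrideA library_set rest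

-- compact(items, limit): OrderedDict.fromkeys of the non-empty items (= PySem.List.dedup), then [:limit]
def compact (items : List String) (limit : Int) : List String :=
  PySem.List.slice (PySem.List.dedup (items.filter (fun item => item ≠ ""))) none (some limit)

def select_digest_practices (library_practices : List String) (override_practices : List String) (limit : Int) : List String :=
  let library_set := PySem.Set.ofList library_practices
  -- 'if library_practices: prioritized.append(library_practices[0])' (head of a nonempty list)
  let prioritized0 : List String :=
    if library_practices ≠ [] then [library_practices.headD ""] else []
  let chosen0 := chooseOverrideA library_set override_practices
  let chosen_override :=
    if chosen0 = "" ∧ override_practices ≠ [] then override_practices.headD "" else chosen0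
  let prioritized :=
    prioritized0
      ++ (if chosen_override ≠ "" then [chosen_override] else [])
      ++ PySem.List.slice library_practices (some 1) none
      ++ override_practices.filter (fun practice => practice ≠ chosen_override)
  compact prioritized limit

-- ===== PORT B =====
-- note(p, k): record rank k for p unless p is empty or p already has a smaller rank
def noteB (rank : PySem.Dict String Int) (p : String) (k : Int) : PySem.Dict String Int :=
  if p ≠ "" ∧ ((rank.get? p).all (fun v => k < v)) = true then rank.insert p k else rank

-- the two 'for … in enumerate(…)' loops plus the lone note(chosen, 1) call of Source B
def buildRank (library_practices : List String) (override_practices : List String) (chosen : String) : PySem.Dict String Int :=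
  let r1 := (PySem.List.enumerate library_practices).foldl
      (fun d ip => noteB d ip.2 (if ip.1 = 0 then 0 else ip.1 + 1)) PySem.Dict.empty
  let r2 := noteB r1 chosen 1
  (PySem.List.enumerate override_practices).foldl
      (fun d jp => if jp.2 ≠ chosen then noteB d jp.2 ((library_practices.length : Int) + 1 + jp.1) else d) r2

def select_digest_practices_alt (library_practices : List String) (override_practices : List String) (limit : Int) : List String :=
  let lib_set := PySem.Set.ofList library_practices
  let c0 := (override_practices.find? (fun p => ¬ PySem.Set.contains lib_set p)).getD ""
  let chosen := if c0 = "" ∧ override_practices ≠ [] then override_practices.headD "" else c0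
  let rank := buildRank library_practices override_practices chosen
  -- sorted(rank, key=rank.get)[:limit]
  PySem.List.slice (PySem.List.sorted rank.keys (fun p => rank.getD p 0)) none (some limit)

-- ===== PRECONDITION & SPEC =====
def Spec_select_digest_practices (library_practices : List String) (override_practices : List String) (limit : Int) (out : List String) : Prop := out = select_digest_practices_alt library_practices override_practices limit
instance (library_practices : List String) (override_practices : List String) (limit : Int) (out : List String) : Decidable (Spec_select_digest_practices library_practices override_practices limit out) := by unfold Spec_select_digest_practices; infer_instance

-- ===== CLAIM (what is proved, stated in full; the proofs are below) =====
def Claim_equal_select_digest_practices : Prop := ∀ (library_practices : List String) (override_practices : List String) (limit : Int), Dom_select_digest_practices library_practices override_practices limit → Spec_select_digest_practices library_practices override_practices limit (select_digest_practices library_practices override_practices limit)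

-- ===== LEMMAS AND PROOFS =====

-- A's break-loop is first-match-or-"" — i.e. B's find?/getD
theorem chooseOverrideA_eq_find (s : PySem.Set String) (ov : List String) :
    chooseOverrideA s ov = (ov.find? (fun p => ¬ PySem.Set.contains s p)).getD "" := by
  induction ov with
  | nil => rfl
  | cons p rest ih =>
    by_cases h : p ∈ s
    · simp [chooseOverrideA, List.find?, h, ih]
    · simp [chooseOverrideA, List.find?, h]

-- minimum of two optional ranks
def omin : Option Int → Option Int → Option Int
  | none, b => b
  | some a, none => some a
  | some a, some b => some (min a b)

theorem omin_none_left (b : Option Int) : omin none b = b := rfl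

theorem omin_assoc (a b c : Option Int) : omin (omin a b) c = omin a (omin b c) := by
  cases a <;> cases b <;> cases c <;> simp [omin, min_assoc]

theorem omin_comm (a b : Option Int) : omin a b = omin b a := by
  cases a <;> cases b <;> simp [omin, min_comm]

-- minimum rank attached to q in a list of (practice, rank) pairs
def minK (q : String) : List (String × Int) → Option Int
  | [] => none
  | pk :: rest => if pk.1 = q then omin (some pk.2) (minK q rest) else minK q rest

theorem minK_append (q : String) (l1 l2 : List (String × Int)) :
    minK q (l1 ++ l2) = omin (minK q l1) (minK q l2) := by
  induction l1 with
  | nil => simp [minK, omin_none_left]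
  | cons pk rest ih =>
    by_cases h : pk.1 = q
    · simp [minK, h, ih, omin_assoc]
    · simp [minK, h, ih]

theorem minK_mem (q : String) (l : List (String × Int)) (m : Int) (h : minK q l = some m) :
    (q, m) ∈ l := by
  induction l with
  | nil => simp [minK] at h
  | cons pk rest ih =>
    obtain ⟨p1, k1⟩ := pk
    by_cases hp : p1 = q
    · rw [minK, if_pos hp] at h
      cases hr : minK q rest with
      | none =>
        rw [hr] at h; simp [omin] at h
        exact List.mem_cons.mpr (Or.inl (by rw [hp, h]))
      | some m' =>
        rw [hr] at h; simp [omin] at h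
        rcases min_cases k1 m' with ⟨he, _⟩ | ⟨he, _⟩
        · exact List.mem_cons.mpr (Or.inl (by rw [hp, ← h, he]))
        · refine List.mem_cons.mpr (Or.inr (ih ?_))
          rw [hr]; exact congrArg some (he.symm.trans h)
    · rw [minK, if_neg hp] at h
      exact List.mem_cons_of_mem _ (ih h)

theorem minK_ne_none_iff (q : String) (l : List (String × Int)) :
    minK q l ≠ none ↔ q ∈ l.map Prod.fst := by
  induction l with
  | nil => simp [minK]
  | cons pk rest ih =>
    by_cases hp : pk.1 = q
    · constructor
      · intro _; simp [hp]
      · intro _; rw [minK, if_pos hp]; cases minK q rest <;> simp [omin]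
    · rw [minK, if_neg hp]
      simp only [List.map_cons, List.mem_cons, ih]
      constructor
      · exact Or.inr
      · rintro (h | h)
        · exact absurd h.symm hp
        · exact h

-- filtering out pairs that can never match q does not change its minimum rank
theorem minK_filter (q : String) (P : String × Int → Bool) (l : List (String × Int))
    (h : ∀ pk : String × Int, pk.1 = q → P pk = true) :
    minK q (l.filter P) = minK q l := by
  induction l with
  | nil => rfl
  | cons pk rest ih =>
    by_cases hp : pk.1 = q
    · rw [List.filter_cons, if_pos (h pk hp), minK, if_pos hp, minK, if_pos hp, ih]
    · rw [List.filter_cons]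
      by_cases hP : P pk = true
      · rw [if_pos hP, minK, if_neg hp, minK, if_neg hp, ih]
      · rw [if_neg hP, minK, if_neg hp, ih]

-- one note() call, seen through get?
theorem get?_noteB (d : PySem.Dict String Int) (p : String) (k : Int) (q : String) :
    (noteB d p k).get? q =
      if q = p ∧ p ≠ "" then omin (d.get? q) (some k) else d.get? q := by
  unfold noteB
  by_cases hp : p = ""
  · simp [hp]
  · by_cases hq : q = p
    · subst hq
      cases hv : d.get? q with
      | none => simp [hp, hv, omin, PySem.Dict.get?_insert]
      | some v =>
        by_cases hk : k < v
        · simp [hp, hv, hk, omin, PySem.Dict.get?_insert]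
          omega
        · simp [hp, hv, hk, omin]
          omega
    · by_cases hall : ((d.get? p).all (fun v => k < v)) = true
      · simp [hp, hall, hq, PySem.Dict.get?_insert]
      · simp [hp, hall, hq]

-- the fold of note() over a pair list computes the minimum rank (for non-empty q)
theorem get?_foldl_noteB (q : String) (hq : q ≠ "") (l : List (String × Int)) :
    ∀ d : PySem.Dict String Int,
      (l.foldl (fun d pk => noteB d pk.1 pk.2) d).get? q = omin (d.get? q) (minK q l) := by
  induction l with
  | nil => intro d; cases h : d.get? q <;> simp [minK, omin, h]
  | cons pk rest ih =>
    intro d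
    rw [List.foldl_cons, ih, get?_noteB]
    by_cases hp : q = pk.1
    · rw [if_pos ⟨hp, hp ▸ hq⟩, minK, if_pos hp.symm, omin_assoc]
    · rw [if_neg (fun hc => hp hc.1), minK, if_neg (fun hc => hp hc.symm)]

-- the empty practice is never inserted
theorem get?_foldl_noteB_empty (l : List (String × Int)) :
    ∀ d : PySem.Dict String Int,
      (l.foldl (fun d pk => noteB d pk.1 pk.2) d).get? "" = d.get? "" := by
  induction l with
  | nil => intro d; rfl
  | cons pk rest ih =>
    intro d
    rw [List.foldl_cons, ih, get?_noteB]
    have : ¬ ("" = pk.1 ∧ pk.1 ≠ "") := fun hc => hc.2 hc.1.symm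
    rw [if_neg this]

-- note() keeps dict keys unique
theorem nodup_keys_foldl_noteB (l : List (String × Int)) :
    ∀ d : PySem.Dict String Int, d.keys.Nodup →
      (l.foldl (fun d pk => noteB d pk.1 pk.2) d).keys.Nodup := by
  induction l with
  | nil => intro d h; exact h
  | cons pk rest ih =>
    intro d h
    rw [List.foldl_cons]
    refine ih _ ?_
    unfold noteB
    split
    · exact PySem.Dict.nodup_keys_insert _ _ _ h
    · exact h

-- the pair list Source B's loops feed to note(), in processing order
def bcand (lib ov : List String) (chosen : String) : List (String × Int) :=
  (PySem.List.enumerate lib).map (fun ip => (ip.2, if ip.1 = 0 then (0 : Int) else ip.1 + 1))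
    ++ [(chosen, 1)]
    ++ (PySem.List.enumerate ov).filterMap
        (fun jp => if jp.2 ≠ chosen then some (jp.2, (lib.length : Int) + 1 + jp.1) else none)

-- the same pairs arranged in A's candidate (priority) order: ranks strictly increase
def kcand (lib ov : List String) (chosen : String) : List (String × Int) :=
  (lib.take 1).map (fun p => (p, (0 : Int)))
    ++ [(chosen, 1)]
    ++ (PySem.List.enumerate lib).tail.map (fun ip => (ip.2, ip.1 + 1))
    ++ (PySem.List.enumerate ov).filterMap
        (fun jp => if jp.2 ≠ chosen then some (jp.2, (lib.length : Int) + 1 + jp.1) else none)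

-- the guarded override loop is the fold of note() over its filterMap'd pair list
theorem foldl_noteB_filterMap (chosen : String) (C : Int) (l : List (Int × String)) :
    ∀ d : PySem.Dict String Int,
      l.foldl (fun d jp => if jp.2 ≠ chosen then noteB d jp.2 (C + jp.1) else d) d
        = (l.filterMap (fun jp => if jp.2 ≠ chosen then some (jp.2, C + jp.1) else none)).foldl
            (fun d pk => noteB d pk.1 pk.2) d := by
  induction l with
  | nil => intro d; rfl
  | cons jp rest ih =>
    intro d
    rw [List.foldl_cons, List.filterMap_cons]
    by_cases h : jp.2 ≠ chosen
    · rw [if_pos h, if_pos h, List.foldl_cons, ih]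
    · rw [if_neg h, if_neg h, ih]

theorem buildRank_eq_foldl (lib ov : List String) (chosen : String) :
    buildRank lib ov chosen =
      (bcand lib ov chosen).foldl (fun d pk => noteB d pk.1 pk.2) PySem.Dict.empty := by
  unfold buildRank bcand
  rw [List.foldl_append, List.foldl_append, List.foldl_map,
    foldl_noteB_filterMap chosen ((lib.length : Int) + 1)]
  rfl

theorem get?_buildRank (lib ov : List String) (chosen : String) (q : String) :
    (buildRank lib ov chosen).get? q =
      if q = "" then none else minK q (bcand lib ov chosen) := by
  rw [buildRank_eq_foldl]
  by_cases hq : q = ""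
  · rw [if_pos hq, hq, get?_foldl_noteB_empty]; rfl
  · rw [if_neg hq, get?_foldl_noteB q hq, PySem.Dict.get?_empty, omin_none_left]

-- index bounds of enumerate
theorem enumerate_fst_bounds (xs : List String) : ∀ (s : Int) (ip : Int × String),
    ip ∈ PySem.List.enumerate xs s → s ≤ ip.1 ∧ ip.1 < s + xs.length := by
  induction xs with
  | nil => intro s ip h; simp [PySem.List.enumerate] at h
  | cons x rest ih =>
    intro s ip h
    rw [PySem.List.enumerate_cons] at h
    rcases List.mem_cons.mp h with h | h
    · subst h; simp
    · have := ih (s + 1) ip h; simp at this ⊢; omega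

theorem enumerate_pairwise_fst (xs : List String) : ∀ s : Int,
    (PySem.List.enumerate xs s).Pairwise (fun a b => a.1 < b.1) := by
  induction xs with
  | nil => intro s; simp [PySem.List.enumerate]
  | cons x rest ih =>
    intro s
    rw [PySem.List.enumerate_cons]
    refine List.Pairwise.cons ?_ (ih (s + 1))
    intro b hb
    have := enumerate_fst_bounds rest (s + 1) b hb
    omega

-- the library part of bcand splits into kcand's head and tail parts
theorem libpart_eq (lib : List String) :
    (PySem.List.enumerate lib).map (fun ip => (ip.2, if ip.1 = 0 then (0 : Int) else ip.1 + 1))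
      = (lib.take 1).map (fun p => (p, (0 : Int)))
        ++ (PySem.List.enumerate lib).tail.map (fun ip => (ip.2, ip.1 + 1)) := by
  cases lib with
  | nil => rfl
  | cons x xs =>
    rw [PySem.List.enumerate_cons]
    simp only [List.map_cons, List.tail_cons, List.take_succ_cons, List.take_zero,
      List.map_nil, List.nil_append, List.singleton_append, if_pos rfl]
    congr 1
    apply List.map_congr_left
    intro ip hip
    have := enumerate_fst_bounds xs 1 ip hip
    have hne : ¬ ip.1 = 0 := by omega
    simp [hne]

-- bcand and kcand hold the same pairs (the chosen pair is merely moved)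
theorem minK_bcand_eq_kcand (lib ov : List String) (chosen : String) (q : String) :
    minK q (bcand lib ov chosen) = minK q (kcand lib ov chosen) := by
  unfold bcand kcand
  rw [libpart_eq]
  rw [List.append_assoc, List.append_assoc, List.append_assoc]
  rw [minK_append, minK_append, minK_append, minK_append, minK_append, minK_append]
  rw [← omin_assoc (minK q ((PySem.List.enumerate lib).tail.map _)),
    omin_comm (minK q ((PySem.List.enumerate lib).tail.map _)), omin_assoc, omin_assoc]

-- the filterMap of the override loop, as a filter-then-map
theorem ovp_eq (chosen : String) (C : Int) (l : List (Int × String)) :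
    l.filterMap (fun jp => if jp.2 ≠ chosen then some (jp.2, C + jp.1) else none)
      = (l.filter (fun jp => jp.2 ≠ chosen)).map (fun jp => (jp.2, C + jp.1)) := by
  induction l with
  | nil => rfl
  | cons jp rest ih =>
    by_cases h : jp.2 = chosen
    · simp [List.filterMap_cons, List.filter_cons, h]
      simpa using ih
    · simp [List.filterMap_cons, List.filter_cons, h]
      simpa using ih

-- when the library is empty, the first override is always the chosen one
theorem enumerate_fst_zero (ov : List String) (jp : Int × String)
    (h : jp ∈ PySem.List.enumerate ov 0) (h0 : jp.1 = 0) : jp.2 = ov.headD "" := by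
  cases ov with
  | nil => simp [PySem.List.enumerate] at h
  | cons x xs =>
    rw [PySem.List.enumerate_cons] at h
    rcases List.mem_cons.mp h with h | h
    · rw [h]; rfl
    · have := enumerate_fst_bounds xs 1 jp h
      omega

-- kcand's ranks strictly increase along the list
-- (hch: with an empty library A's code always picks the first override as chosen)
theorem kcand_pairwise (lib ov : List String) (chosen : String)
    (hch : lib = [] → ov ≠ [] → chosen = ov.headD "") :
    (kcand lib ov chosen).Pairwise (fun a b => a.2 < b.2) := by
  unfold kcand
  rw [ovp_eq]
  have htail : ∀ pk : String × Int,
      pk ∈ (PySem.List.enumerate lib).tail.map (fun ip => (ip.2, ip.1 + 1)) →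
      2 ≤ pk.2 ∧ pk.2 ≤ (lib.length : Int) := by
    intro pk hpk
    rcases List.mem_map.mp hpk with ⟨ip, hip, rfl⟩
    cases lib with
    | nil => simp [PySem.List.enumerate] at hip
    | cons x xs =>
      rw [PySem.List.enumerate_cons, List.tail_cons] at hip
      have := enumerate_fst_bounds xs 1 ip hip
      simp only [List.length_cons]
      push_cast
      omega
  have hov : ∀ pk : String × Int,
      pk ∈ ((PySem.List.enumerate ov).filter (fun jp => jp.2 ≠ chosen)).map
          (fun jp => ((jp.2 : String), (lib.length : Int) + 1 + jp.1)) →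
      (lib.length : Int) + 1 ≤ pk.2 ∧ (1 : Int) < pk.2 := by
    intro pk hpk
    rcases List.mem_map.mp hpk with ⟨jp, hjp, rfl⟩
    have hjm := List.mem_of_mem_filter hjp
    have hb := enumerate_fst_bounds ov 0 jp hjm
    refine ⟨by omega, ?_⟩
    cases hl : lib with
    | cons x xs => subst hl; simp only [List.length_cons]; push_cast; omega
    | nil =>
      subst hl
      have hovne : ov ≠ [] := by rintro rfl; simp [PySem.List.enumerate] at hjm
      have hne : jp.2 ≠ chosen := by simpa using (List.mem_filter.mp hjp).2
      have h0 : jp.1 ≠ 0 := by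
        intro h0
        exact hne ((enumerate_fst_zero ov jp hjm h0).trans (hch rfl hovne).symm)
      simp only [List.length_nil]
      omega
  have htailpw : ((PySem.List.enumerate lib).tail.map
      (fun ip => ((ip.2 : String), ip.1 + 1))).Pairwise (fun a b => a.2 < b.2) := by
    rw [List.pairwise_map]
    have hpw := List.Pairwise.sublist (List.tail_sublist _) (enumerate_pairwise_fst lib 0)
    exact hpw.imp (fun {a b} h => by show a.1 + 1 < b.1 + 1; omega)
  have hovpw : (((PySem.List.enumerate ov).filter (fun jp => jp.2 ≠ chosen)).map
      (fun jp => ((jp.2 : String), (lib.length : Int) + 1 + jp.1))).Pairwise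
        (fun a b => a.2 < b.2) := by
    rw [List.pairwise_map]
    have hpw := List.Pairwise.sublist (List.filter_sublist (l := PySem.List.enumerate ov)
        (p := fun jp => jp.2 ≠ chosen)) (enumerate_pairwise_fst ov 0)
    exact hpw.imp (fun {a b} h => by
      show (lib.length : Int) + 1 + a.1 < (lib.length : Int) + 1 + b.1; omega)
  rw [List.append_assoc, List.append_assoc]
  rw [List.pairwise_append]
  refine ⟨?_, ?_, ?_⟩
  · rcases lib with _ | ⟨x, xs⟩ <;> simp
  · rw [List.pairwise_append]
    refine ⟨List.pairwise_singleton _ _, ?_, ?_⟩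
    · rw [List.pairwise_append]
      exact ⟨htailpw, hovpw, fun a ha b hb => by
        have := htail a ha; have := hov b hb; omega⟩
    · intro a ha b hb
      rcases List.mem_singleton.mp ha with rfl
      rcases List.mem_append.mp hb with hb | hb
      · have := htail b hb; show (1 : Int) < b.2; omega
      · have := hov b hb; show (1 : Int) < b.2; omega
  · intro a ha b hb
    rcases List.mem_map.mp ha with ⟨p, _, rfl⟩
    rcases List.mem_append.mp hb with hb | hb
    · rcases List.mem_singleton.mp hb with rfl
      show (0 : Int) < 1; omega
    · rcases List.mem_append.mp hb with hb | hb
      · have := htail b hb; show (0 : Int) < b.2; omega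
      · have := hov b hb; show (0 : Int) < b.2; omega

-- the overrides part of the pair lists, projected to practices
theorem ovp_map_fst (ov : List String) (chosen : String) (C : Int) :
    (((PySem.List.enumerate ov).filter (fun jp => jp.2 ≠ chosen)).map
        (fun jp => ((jp.2 : String), C + jp.1))).map Prod.fst
      = ov.filter (fun p => p ≠ chosen) := by
  rw [List.map_map]
  show ((PySem.List.enumerate ov).filter (fun jp => jp.2 ≠ chosen)).map (fun jp => jp.2)
      = ov.filter (fun p => p ≠ chosen)
  conv_rhs => rw [← PySem.List.map_snd_enumerate ov 0, List.filter_map]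
  rfl

-- kcand's practices, in order, are A's prioritized candidate list
theorem kcand_map_fst (lib ov : List String) (chosen : String) :
    (kcand lib ov chosen).map Prod.fst =
      lib.take 1 ++ [chosen] ++ lib.tail ++ ov.filter (fun p => p ≠ chosen) := by
  unfold kcand
  rw [ovp_eq]
  have h1 : ((lib.take 1).map (fun p => (p, (0 : Int)))).map Prod.fst = lib.take 1 := by
    rw [List.map_map]
    exact List.map_congr_left (fun a _ => rfl) |>.trans (List.map_id _)
  have h2 : ((PySem.List.enumerate lib).tail.map (fun ip => (ip.2, ip.1 + 1))).map Prod.fst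
      = lib.tail := by
    rw [List.map_map]
    show (PySem.List.enumerate lib).tail.map (fun ip => ip.2) = lib.tail
    rw [List.map_tail, PySem.List.map_snd_enumerate]
  rw [List.map_append, List.map_append, List.map_append, h1, h2, ovp_map_fst]
  simp [List.append_assoc]

theorem bcand_map_fst (lib ov : List String) (chosen : String) :
    (bcand lib ov chosen).map Prod.fst =
      lib ++ [chosen] ++ ov.filter (fun p => p ≠ chosen) := by
  unfold bcand
  rw [ovp_eq]
  have h1 : ((PySem.List.enumerate lib).map
        (fun ip => ((ip.2 : String), if ip.1 = 0 then (0 : Int) else ip.1 + 1))).map Prod.fst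
      = lib := by
    rw [List.map_map]
    exact PySem.List.map_snd_enumerate lib 0
  rw [List.map_append, List.map_append, h1, ovp_map_fst]
  simp [List.append_assoc]

-- first occurrence of each practice in a pair list, tracked with a seen-set
def firstOcc (S : PySem.Set String) : List (String × Int) → List (String × Int)
  | [] => []
  | pk :: rest =>
    if ¬ PySem.Set.contains S pk.1 then pk :: firstOcc (PySem.Set.add S pk.1) rest
    else firstOcc S rest

theorem firstOcc_sublist (l : List (String × Int)) : ∀ S, (firstOcc S l).Sublist l := by
  induction l with
  | nil => intro S; simp [firstOcc]
  | cons pk rest ih =>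
    intro S
    rw [firstOcc]
    split
    · exact List.Sublist.cons₂ pk (ih _)
    · exact List.Sublist.cons pk (ih S)

theorem firstOcc_not_seen (l : List (String × Int)) : ∀ S pk, pk ∈ firstOcc S l → pk.1 ∉ S := by
  induction l with
  | nil => intro S pk h; simp [firstOcc] at h
  | cons qk rest ih =>
    intro S pk h
    rw [firstOcc] at h
    by_cases hc : qk.1 ∈ S
    · rw [if_neg (by simp [PySem.Set.contains_iff, hc])] at h
      exact ih S pk h
    · rw [if_pos (by simp [PySem.Set.contains_iff, hc])] at h
      rcases List.mem_cons.mp h with h | h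
      · subst h; exact hc
      · intro hmem
        exact ih _ pk h ((PySem.Set.mem_add S qk.1 pk.1).mpr (Or.inl hmem))

-- with strictly increasing ranks, every first occurrence carries its practice's minimum rank
theorem firstOcc_minK (l : List (String × Int)) (hl : l.Pairwise (fun a b => a.2 < b.2)) :
    ∀ S pk, pk ∈ firstOcc S l → minK pk.1 l = some pk.2 := by
  induction l with
  | nil => intro S pk h; simp [firstOcc] at h
  | cons qk rest ih =>
    intro S pk h
    have hlt : ∀ r ∈ rest, qk.2 < r.2 := fun r hr => List.rel_of_pairwise_cons hl hr
    have hrest : rest.Pairwise (fun a b => a.2 < b.2) := hl.of_cons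
    rw [firstOcc] at h
    by_cases hc : qk.1 ∈ S
    · rw [if_neg (by simp [PySem.Set.contains_iff, hc])] at h
      have hne : pk.1 ≠ qk.1 := fun he => (firstOcc_not_seen rest S pk h) (he ▸ hc)
      rw [minK, if_neg (fun hx => hne hx.symm)]
      exact ih hrest S pk h
    · rw [if_pos (by simp [PySem.Set.contains_iff, hc])] at h
      rcases List.mem_cons.mp h with h | h
      · subst h
        rw [minK, if_pos rfl]
        cases hr : minK pk.1 rest with
        | none => simp [omin]
        | some m =>
          have := hlt _ (minK_mem _ _ _ hr)
          simp [omin]; omega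
      · have hne : pk.1 ≠ qk.1 := fun he =>
          (firstOcc_not_seen rest _ pk h) ((PySem.Set.mem_add S qk.1 pk.1).mpr (Or.inr he))
        rw [minK, if_neg (fun hx => hne hx.symm)]
        exact ih hrest _ pk h

-- dedup-with-seen over plain strings
def dedupFrom (S : PySem.Set String) : List String → List String
  | [] => []
  | p :: rest =>
    if ¬ PySem.Set.contains S p then p :: dedupFrom (PySem.Set.add S p) rest
    else dedupFrom S rest

theorem foldl_add_eq_dedupFrom (xs : List String) : ∀ S : PySem.Set String,
    xs.foldl PySem.Set.add S = S ++ dedupFrom S xs := by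
  induction xs with
  | nil => intro S; simp [dedupFrom]
  | cons p rest ih =>
    intro S
    rw [List.foldl_cons, ih, dedupFrom]
    by_cases hc : p ∈ S
    · rw [if_neg (by simp [PySem.Set.contains_iff, hc]), PySem.Set.add_of_mem hc]
    · rw [if_pos (by simp [PySem.Set.contains_iff, hc]), PySem.Set.add_of_not_mem hc]
      simp

theorem dedup_eq_dedupFrom (xs : List String) :
    PySem.List.dedup xs = dedupFrom PySem.Set.empty xs := by
  rw [PySem.List.dedup_eq_ofList, PySem.Set.ofList_eq_foldl, foldl_add_eq_dedupFrom]
  rfl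

theorem firstOcc_map_fst (l : List (String × Int)) : ∀ S,
    (firstOcc S l).map Prod.fst = dedupFrom S (l.map Prod.fst) := by
  induction l with
  | nil => intro S; simp [firstOcc, dedupFrom]
  | cons pk rest ih =>
    intro S
    rw [List.map_cons, firstOcc, dedupFrom]
    split
    · rw [List.map_cons, ih]
    · rw [ih]

-- ===== the central equality: sorted-by-rank equals A's ordered dedup =====
set_option maxHeartbeats 1000000 in
theorem sorted_keys_eq_dedup (lib ov : List String) (chosen : String)
    (hch : lib = [] → ov ≠ [] → chosen = ov.headD "") :
    PySem.List.sorted (buildRank lib ov chosen).keys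
        (fun p => (buildRank lib ov chosen).getD p 0) =
      PySem.List.dedup
        ((lib.take 1 ++ [chosen] ++ lib.tail ++ ov.filter (fun p => p ≠ chosen)).filter
          (fun item => item ≠ "")) := by
  set r := buildRank lib ov chosen with hr
  set K := (kcand lib ov chosen).filter (fun pk => pk.1 ≠ "") with hK
  have hcd : (lib.take 1 ++ [chosen] ++ lib.tail ++ ov.filter (fun p => p ≠ chosen)).filter
      (fun item => item ≠ "") = K.map Prod.fst := by
    rw [← kcand_map_fst, List.filter_map]
    rfl
  have hKpw : K.Pairwise (fun a b => a.2 < b.2) :=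
    List.Pairwise.sublist List.filter_sublist (kcand_pairwise lib ov chosen hch)
  have hD : PySem.List.dedup (K.map Prod.fst) = (firstOcc PySem.Set.empty K).map Prod.fst := by
    rw [dedup_eq_dedupFrom, ← firstOcc_map_fst]
  have hkey : ∀ pk ∈ firstOcc PySem.Set.empty K, r.getD pk.1 0 = pk.2 := by
    intro pk hpk
    have hmemK : pk ∈ K := (firstOcc_sublist K PySem.Set.empty).subset hpk
    have hne : pk.1 ≠ "" := by simpa using (List.mem_filter.mp hmemK).2
    have hP : ∀ pk' : String × Int, pk'.1 = pk.1 → decide (pk'.1 ≠ "") = true := by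
      intro pk' h'; simp [h', hne]
    rw [PySem.Dict.getD_eq_get?_getD, hr, get?_buildRank, if_neg hne,
      minK_bcand_eq_kcand, ← minK_filter pk.1 (fun pk => pk.1 ≠ "") _ hP, ← hK,
      firstOcc_minK K hKpw _ pk hpk]
    rfl
  have hDpw : ((firstOcc PySem.Set.empty K).map Prod.fst).Pairwise
      (fun a b => r.getD a 0 < r.getD b 0) := by
    rw [List.pairwise_map]
    have hfo := List.Pairwise.sublist (firstOcc_sublist K PySem.Set.empty) hKpw
    exact List.Pairwise.imp_of_mem (fun {a b} ha hb h => by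
      rw [hkey a ha, hkey b hb]; exact h) hfo
  have hnodupD : ((firstOcc PySem.Set.empty K).map Prod.fst).Nodup := by
    rw [← hD]; exact PySem.List.nodup_dedup _
  have hkn : r.keys.Nodup := by
    rw [hr, buildRank_eq_foldl]
    exact nodup_keys_foldl_noteB _ _ PySem.Dict.nodup_keys_empty
  have hsplit : ∀ x : String, x ∈ lib.take 1 ∨ x ∈ lib.tail ↔ x ∈ lib := by
    intro x; cases lib <;> simp
  have hmem : ∀ q : String, q ∈ (firstOcc PySem.Set.empty K).map Prod.fst ↔ q ∈ r.keys := by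
    intro q
    have hkeys : q ∈ r.keys ↔ ¬ (r.get? q = none) := by
      rw [PySem.Dict.get?_eq_none_iff_not_mem_keys]; tauto
    by_cases hq : q = ""
    · subst hq
      constructor
      · intro h
        exfalso
        rcases List.mem_map.mp h with ⟨pk, hpk, hfst⟩
        have : pk.1 ≠ "" := by
          simpa using (List.mem_filter.mp ((firstOcc_sublist K _).subset hpk)).2
        exact this hfst
      · intro h
        rw [hkeys, hr, get?_buildRank, if_pos rfl] at h
        exact absurd rfl h
    · rw [hkeys, hr, get?_buildRank, if_neg hq, ← hD, PySem.List.mem_dedup, ← hcd,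
        List.mem_filter]
      have hmk := minK_ne_none_iff q (bcand lib ov chosen)
      rw [bcand_map_fst] at hmk
      rw [show (¬ (minK q (bcand lib ov chosen) = none)) ↔
          q ∈ lib ++ [chosen] ++ ov.filter (fun p => p ≠ chosen) from hmk]
      simp only [List.mem_append, List.mem_singleton, decide_eq_true_eq, ne_eq]
      have := hsplit q
      tauto
  have hperm : ((firstOcc PySem.Set.empty K).map Prod.fst).Perm r.keys :=
    (List.perm_ext_iff_of_nodup hnodupD hkn).mpr hmem
  rw [hcd, hD]
  exact PySem.List.sorted_eq_of_perm_of_pairwise_lt r.keys _ _ hperm hDpw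

-- ===== VERDICT (by name: the statement is the Claim_ definition above) =====
set_option maxHeartbeats 1000000 in
theorem select_digest_practices_spec : Claim_equal_select_digest_practices := by
  intro lib ov limit _
  show select_digest_practices lib ov limit = select_digest_practices_alt lib ov limit
  simp only [select_digest_practices, select_digest_practices_alt, compact]
  rw [← chooseOverrideA_eq_find]
  set c0 := chooseOverrideA (PySem.Set.ofList lib) ov with hc0
  set chosen := if c0 = "" ∧ ov ≠ [] then ov.headD "" else c0 with hc
  have hch : lib = [] → ov ≠ [] → chosen = ov.headD "" := by
    rintro rfl hov
    cases ov with
    | nil => exact absurd rfl hov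
    | cons x xs =>
      have hx : ¬ PySem.Set.contains (PySem.Set.ofList ([] : List String)) x = true := by
        rw [PySem.Set.contains_iff, PySem.Set.mem_ofList]
        simp
      have hcx : c0 = x := by rw [hc0, chooseOverrideA, if_pos hx]
      rw [hc, hcx]
      by_cases hxe : x = "" <;> simp [hxe]
  have h1 : (if lib ≠ [] then [lib.headD ""] else []) = lib.take 1 := by
    cases lib <;> simp
  rw [h1, PySem.List.slice_from_one]
  have hfilter :
      (((lib.take 1 ++ (if chosen ≠ "" then [chosen] else []))
          ++ lib.tail ++ ov.filter (fun practice => practice ≠ chosen)).filter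
        (fun item => item ≠ ""))
      = ((lib.take 1 ++ [chosen] ++ lib.tail ++ ov.filter (fun p => p ≠ chosen)).filter
          (fun item => item ≠ "")) := by
    by_cases hce : chosen = "" <;> simp [List.filter_append, List.append_assoc, hce]
  rw [hfilter, ← sorted_keys_eq_dedup lib ov chosen hch]
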